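-- pv_equiv track=rewrite | github.com/dadosabertosrn/cota_parlamentar | parser.py | getInfoFromTitle
-- ===== SOURCE A (Python) =====
-- def getInfoFromTitle(title):
--     info = dict()
--
--     name = []
--     nameStart = False
--     for i in range(len(title)):
--         if nameStart:
--             name.append(title[i])
--         elif title[i] == 'Vereador(a):':
--             nameStart = True
--
--     info["nameVereador"] = " ".join(name)
--     info["dateDocument"] = title[0]
--
--     return info
-- ===== SOURCE B (Python) =====
-- def getInfoFromTitle(title):
--     # Locate-then-slice: find the marker once, take everything after it.
--     if 'Vereador(a):' in title:
--         name = title[title.index('Vereador(a):') + 1:]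
--     else:
--         name = []
--     return {"nameVereador": " ".join(name), "dateDocument": title[0]}
-- ===== Notes on version B (the rewrite author's own statement) =====
-- stated objective: simpler
-- what changed: Replaced the flag-driven accumulate-after-marker loop with a locate-then-slice decomposition: test membership, take title[index+1:] as the name, and build the dict in one literal.
import Mathlib
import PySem

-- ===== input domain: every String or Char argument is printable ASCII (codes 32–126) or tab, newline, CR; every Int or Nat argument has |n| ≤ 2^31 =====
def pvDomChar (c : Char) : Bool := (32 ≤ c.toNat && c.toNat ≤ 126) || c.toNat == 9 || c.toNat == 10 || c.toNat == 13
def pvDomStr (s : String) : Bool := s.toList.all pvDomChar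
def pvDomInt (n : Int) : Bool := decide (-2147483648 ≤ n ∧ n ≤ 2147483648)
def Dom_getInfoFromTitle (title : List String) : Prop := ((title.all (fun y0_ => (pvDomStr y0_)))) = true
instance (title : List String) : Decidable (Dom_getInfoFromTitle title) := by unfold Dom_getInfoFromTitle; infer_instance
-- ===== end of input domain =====

-- B replaces A's flag-driven accumulate-after-marker loop by a locate-then-slice decomposition (simpler).

-- ===== PORT A =====
def getInfoFromTitle (title : List String) : List (String × String) :=
  -- name = []; nameStart = False; for i in range(len(title)): ...
  -- info["nameVereador"] = " ".join(name); info["dateDocument"] = title[0]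
  (PySem.Dict.insert
    (PySem.Dict.insert (PySem.Dict.empty : PySem.Dict String String) "nameVereador"
      (PySem.Str.join " "
        ((PySem.List.pyRange 0 (title.length : Int) 1).foldl
          (fun (st : List String × Bool) i =>
            if st.2 then (st.1 ++ [PySem.List.pyGetD title i ""], st.2)
            else if PySem.List.pyGetD title i "" = "Vereador(a):" then (st.1, true)
            else st) ([], false)).1))
    "dateDocument" (PySem.List.pyGetD title 0 "")).items

-- ===== PORT B =====
def getInfoFromTitle_alt (title : List String) : List (String × String) :=
  [("nameVereador", PySem.Str.join " "
      (if "Vereador(a):" ∈ title then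
        PySem.List.slice title (some (((PySem.List.index? title "Vereador(a):").getD 0 : Nat) + 1)) none
      else [])),
   ("dateDocument", PySem.List.pyGetD title 0 "")]

-- ===== PRECONDITION & SPEC =====
-- Pre_ excludes exactly the empty list, on which the Python A raises IndexError at title[0] (B raises too).
def Pre_getInfoFromTitle (title : List String) : Prop := title ≠ []
instance (title : List String) : Decidable (Pre_getInfoFromTitle title) := by unfold Pre_getInfoFromTitle; infer_instance
def pvWitness_getInfoFromTitle : List String := ["2020-01-01", "Vereador(a):", "Joao", "Silva"]

def Spec_getInfoFromTitle (title : List String) (out : List (String × String)) : Prop := out = getInfoFromTitle_alt title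
instance (title : List String) (out : List (String × String)) : Decidable (Spec_getInfoFromTitle title out) := by unfold Spec_getInfoFromTitle; infer_instance

-- ===== CLAIM (what is proved, stated in full; the proofs are below) =====
def Claim_equal_getInfoFromTitle : Prop := ∀ (title : List String), Dom_getInfoFromTitle title → Pre_getInfoFromTitle title → Spec_getInfoFromTitle title (getInfoFromTitle title)

-- ===== LEMMAS AND PROOFS =====

-- A's loop body, as a fold step over the list elements
def pvStep (st : List String × Bool) (x : String) : List String × Bool :=
  if st.2 then (st.1 ++ [x], st.2)
  else if x = "Vereador(a):" then (st.1, true)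
  else st

lemma pvStep_true (l : List String) (acc : List String) :
    l.foldl pvStep (acc, true) = (acc ++ l, true) := by
  induction l generalizing acc with
  | nil => simp
  | cons x xs ih => simp [pvStep, ih]

lemma pvFold_false (l : List String) (acc : List String) :
    (l.foldl pvStep (acc, false)).1 =
      acc ++ (match PySem.List.index? l "Vereador(a):" with
              | some k => l.drop (k + 1)
              | none => []) := by
  induction l generalizing acc with
  | nil => simp [PySem.List.index?]
  | cons x xs ih =>
    by_cases hx : x = "Vereador(a):"
    · subst hx
      rw [PySem.List.index?_cons_self]
      simp [List.foldl_cons, pvStep, pvStep_true]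
    · rw [PySem.List.index?_cons_of_ne xs hx]
      simp only [List.foldl_cons, pvStep, hx, Bool.false_eq_true, ite_false]
      rw [ih acc]
      cases h : PySem.List.index? xs "Vereador(a):" with
      | none => simp
      | some k => simp [List.drop]

-- ===== VERDICT (by name: the statement is the Claim_ definition above) =====
theorem getInfoFromTitle_spec : Claim_equal_getInfoFromTitle := by
  intro title _ _
  show getInfoFromTitle title = getInfoFromTitle_alt title
  unfold getInfoFromTitle getInfoFromTitle_alt
  rw [show (fun (st : List String × Bool) i =>
      if st.2 then (st.1 ++ [PySem.List.pyGetD title i ""], st.2)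
      else if PySem.List.pyGetD title i "" = "Vereador(a):" then (st.1, true)
      else st) = (fun st i => pvStep st (PySem.List.pyGetD title i "")) from rfl,
    PySem.List.foldl_pyRange_zero_pyGetD']
  by_cases hmem : "Vereador(a):" ∈ title
  · have hsome : (PySem.List.index? title "Vereador(a):").isSome := by
      rw [PySem.List.index?_isSome_iff]; exact hmem
    obtain ⟨k, hk⟩ := Option.isSome_iff_exists.mp hsome
    rw [pvFold_false title [], hk]
    simp [hmem, PySem.Dict.insert, PySem.Dict.empty, PySem.Dict.contains]
    rw [show ((k : Int) + 1) = (((k + 1 : Nat) : Int)) by push_cast; ring,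
      PySem.List.slice_from_natCast]
  · have hnone : PySem.List.index? title "Vereador(a):" = none := by
      rw [PySem.List.index?_eq_none_iff]; exact hmem
    rw [pvFold_false title [], hnone]
    simp [hmem, PySem.Dict.insert, PySem.Dict.empty, PySem.Dict.contains]
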